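-- pv_equiv track=rewrite | github.com/dldbdud314/PS | programmers/숫자게임.py | solution
-- ===== SOURCE A (Python) =====
-- from bisect import bisect_right
--
-- def solution(A, B):
--     B.sort()
--     taken = [False] * len(B)
--     score = 0
--     for x in A:
--         idx = bisect_right(B, x)
--         if idx < len(B):
--             for j in range(idx, len(B)):
--                 if not taken[j]:
--                     taken[j] = True
--                     score += 1
--                     break
--     return score
-- ===== SOURCE B (Python) =====
-- def solution(A, B):
--     # sort both lists, then a single two-pointer sweep (A is not mutated, unlike the original)
--     As = sorted(A)
--     Bs = sorted(B)
--     i = j = score = 0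
--     while i < len(As) and j < len(Bs):
--         if As[i] < Bs[j]:
--             score += 1
--             i += 1
--         j += 1
--     return score
-- ===== Notes on version B (the rewrite author's own statement) =====
-- stated objective: faster
-- what changed: Replaced the per-element greedy (bisect plus linear scan over a taken-flags array, processing A in its original order) by sorting both lists once and counting matches with a single two-pointer sweep.
import Mathlib
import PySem

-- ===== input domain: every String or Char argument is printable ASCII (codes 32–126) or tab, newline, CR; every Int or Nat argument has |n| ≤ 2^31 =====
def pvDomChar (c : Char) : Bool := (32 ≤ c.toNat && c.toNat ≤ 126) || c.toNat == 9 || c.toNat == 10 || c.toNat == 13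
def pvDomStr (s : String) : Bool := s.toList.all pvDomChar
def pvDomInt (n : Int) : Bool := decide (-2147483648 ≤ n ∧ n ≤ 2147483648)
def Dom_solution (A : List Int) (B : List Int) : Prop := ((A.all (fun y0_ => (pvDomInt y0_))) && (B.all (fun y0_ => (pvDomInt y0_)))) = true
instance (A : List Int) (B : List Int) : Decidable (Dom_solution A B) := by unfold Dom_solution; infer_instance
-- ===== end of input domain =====

-- B replaces A's per-element greedy over a taken-flags array by sorting both lists and one
-- two-pointer sweep (measurably faster; note: Python A sorts B in place, B does not mutate;
-- the equivalence proved here is about the return value).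

-- ===== PORT A =====
-- inner 'for j in range(idx, len(B)): if not taken[j]: taken[j]=True; score+=1; break'
-- ported as a structural scan over the suffix taken[idx:] for the first False (exact)
def pyTakeFirstFree : List Bool → Option (List Bool)
  | [] => none
  | false :: t => some (true :: t)
  | true :: t => (pyTakeFirstFree t).map (true :: ·)

def pyStepA (Bs : List Int) (st : Int × List Bool) (x : Int) : Int × List Bool :=
  let idx := PySem.List.bisectRight Bs x
  if idx < Bs.length then
    match pyTakeFirstFree (st.2.drop idx) with
    | some t' => (st.1 + 1, st.2.take idx ++ t')
    | none => st
  else st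

def solution (A : List Int) (B : List Int) : Int :=
  let Bs := PySem.List.sorted B (fun b => b)
  (A.foldl (pyStepA Bs) (0, List.replicate Bs.length false)).1

-- ===== PORT B =====
-- Source B's while loop over indices i, j ported as recursion over the two suffixes (exact)
def tpGo : List Int → List Int → Int
  | _, [] => 0
  | [], _ :: _ => 0
  | a :: as, b :: bs => if a < b then 1 + tpGo as bs else tpGo (a :: as) bs
  termination_by _ bs => bs.length

def solution_alt (A : List Int) (B : List Int) : Int :=
  tpGo (PySem.List.sorted A (fun a => a)) (PySem.List.sorted B (fun b => b))

-- ===== PRECONDITION & SPEC =====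
def Spec_solution (A : List Int) (B : List Int) (out : Int) : Prop := out = solution_alt A B
instance (A : List Int) (B : List Int) (out : Int) : Decidable (Spec_solution A B out) := by unfold Spec_solution; infer_instance

-- ===== CLAIM (what is proved, stated in full; the proofs are below) =====
def Claim_equal_solution : Prop := ∀ (A : List Int) (B : List Int), Dom_solution A B → Spec_solution A B (solution A B)

-- ===== LEMMAS AND PROOFS =====

-- remove the first element greater than x from a list (abstract view of A's greedy step)
def rfg (x : Int) : List Int → Option (List Int)
  | [] => none
  | b :: bs => if x < b then some bs else (rfg x bs).map (b :: ·)

def gStep (st : Int × List Int) (x : Int) : Int × List Int :=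
  match rfg x st.2 with
  | none => st
  | some r => (st.1 + 1, r)

-- the untaken elements, in order
def rem : List Int → List Bool → List Int
  | b :: bs, t :: ts => if t then rem bs ts else b :: rem bs ts
  | _, _ => []

-- recursion form of the greedy fold
def gRec : List Int → List Int → Int
  | [], _ => 0
  | a :: as, bs =>
    match rfg a bs with
    | none => gRec as bs
    | some r => 1 + gRec as r

lemma rem_replicate (bs : List Int) : rem bs (List.replicate bs.length false) = bs := by
  induction bs with
  | nil => rfl
  | cons b bs ih => simp [rem, List.replicate, ih]

lemma br_char_unique (xs : List Int) (x : Int) (k : Nat)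
    (hs : List.Pairwise (· ≤ ·) xs) (hk : k ≤ xs.length)
    (h1 : ∀ j (hj : j < xs.length), j < k → xs[j] ≤ x)
    (h2 : ∀ j (hj : j < xs.length), k ≤ j → x < xs[j]) :
    PySem.List.bisectRight xs x = k := by
  obtain ⟨hle, ha, hb⟩ := PySem.List.bisectRight_spec xs x hs
  set i := PySem.List.bisectRight xs x with hi
  rcases lt_trichotomy i k with h | h | h
  · have hik : i < xs.length := lt_of_lt_of_le h hk
    have := h1 i hik h
    have := hb i hik (le_refl _)
    omega
  · exact h
  · have hki : k < xs.length := lt_of_lt_of_le h hle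
    have := ha k hki h
    have := h2 k hki (le_refl _)
    omega

lemma br_zero (b : Int) (xs : List Int) (x : Int)
    (hs : List.Pairwise (· ≤ ·) (b :: xs)) (hx : x < b) :
    PySem.List.bisectRight (b :: xs) x = 0 := by
  apply br_char_unique _ _ _ hs (Nat.zero_le _)
  · intro j _ hj0; omega
  · intro j hj _
    match j with
    | 0 => simp only [List.getElem_cons_zero]; exact hx
    | j + 1 =>
      have hmem : (b :: xs)[j+1] ∈ xs := by
        simp only [List.getElem_cons_succ]
        exact List.getElem_mem (Nat.lt_of_succ_lt_succ hj)
      have hble : b ≤ (b :: xs)[j+1] := (List.pairwise_cons.mp hs).1 _ hmem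
      omega

lemma br_cons (b : Int) (xs : List Int) (x : Int)
    (hs : List.Pairwise (· ≤ ·) (b :: xs)) (hx : b ≤ x) :
    PySem.List.bisectRight (b :: xs) x = PySem.List.bisectRight xs x + 1 := by
  have hs' : List.Pairwise (· ≤ ·) xs := (List.pairwise_cons.mp hs).2
  obtain ⟨hle, ha, hb⟩ := PySem.List.bisectRight_spec xs x hs'
  apply br_char_unique _ _ _ hs (by simpa using Nat.succ_le_succ hle)
  · intro j hj hjk
    match j with
    | 0 => simp only [List.getElem_cons_zero]; exact hx
    | j + 1 =>
      have := ha j (by simpa using hj) (by omega)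
      simpa using this
  · intro j hj hjk
    match j with
    | 0 => omega
    | j + 1 =>
      have := hb j (by simpa using hj) (by omega)
      simpa using this

lemma tff_length (ts t' : List Bool) (h : pyTakeFirstFree ts = some t') :
    t'.length = ts.length := by
  induction ts generalizing t' with
  | nil => simp [pyTakeFirstFree] at h
  | cons a ts ih =>
    cases a with
    | false => simp [pyTakeFirstFree] at h; subst h; simp
    | true =>
      simp [pyTakeFirstFree, Option.map_eq_some_iff] at h
      obtain ⟨u, hu, rfl⟩ := h
      simp [ih u hu]

-- A's scan on a suffix where every value beats x ≙ removing the first element > x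
lemma L0 (x : Int) (Bs : List Int) (ts : List Bool)
    (hall : ∀ c ∈ Bs, x < c) (hlen : ts.length = Bs.length) :
    rfg x (rem Bs ts) = (pyTakeFirstFree ts).map (fun t' => rem Bs t') := by
  induction Bs generalizing ts with
  | nil =>
    have : ts = [] := List.length_eq_zero_iff.mp (by simpa using hlen)
    subst this; rfl
  | cons b Bs ih =>
    match ts with
    | [] => simp at hlen
    | t :: ts =>
      have hxb : x < b := hall b (by simp)
      have hall' : ∀ c ∈ Bs, x < c := fun c hc => hall c (by simp [hc])
      have hlen' : ts.length = Bs.length := by simpa using hlen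
      cases t with
      | false =>
        simp [rem, pyTakeFirstFree, rfg, hxb]
      | true =>
        have := ih ts hall' hlen'
        cases hp : pyTakeFirstFree ts with
        | none => simp [rem, pyTakeFirstFree, hp, hp ▸ this]
        | some u => simp [rem, pyTakeFirstFree, hp, hp ▸ this]

-- one step of A simulates one step of the abstract greedy
lemma stepA_sim (Bs : List Int) (ts : List Bool) (sc x : Int)
    (hs : List.Pairwise (· ≤ ·) Bs) (hlen : ts.length = Bs.length) :
    ((pyStepA Bs (sc, ts) x).1, rem Bs (pyStepA Bs (sc, ts) x).2) = gStep (sc, rem Bs ts) x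
    ∧ (pyStepA Bs (sc, ts) x).2.length = Bs.length := by
  induction Bs generalizing ts sc with
  | nil =>
    have : ts = [] := List.length_eq_zero_iff.mp (by simpa using hlen)
    subst this
    simp [pyStepA, gStep, rem, rfg]
  | cons b Bs ih =>
    match ts with
    | [] => simp at hlen
    | t :: ts =>
      have hs' : List.Pairwise (· ≤ ·) Bs := (List.pairwise_cons.mp hs).2
      have hhead : ∀ c ∈ Bs, b ≤ c := (List.pairwise_cons.mp hs).1
      have hlen' : ts.length = Bs.length := by simpa using hlen
      by_cases hxb : x < b
      · -- idx = 0 : the whole list beats x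
        have hidx : PySem.List.bisectRight (b :: Bs) x = 0 := br_zero b Bs x hs hxb
        cases t with
        | false =>
          simp [pyStepA, hidx, pyTakeFirstFree, gStep, rem, rfg, hxb, hlen']
        | true =>
          have hall' : ∀ c ∈ Bs, x < c := fun c hc => lt_of_lt_of_le hxb (hhead c hc)
          have hL0 := L0 x Bs ts hall' hlen'
          cases hp : pyTakeFirstFree ts with
          | none =>
            simp [pyStepA, hidx, pyTakeFirstFree, hp, gStep, rem, hp ▸ hL0, hlen]
          | some u =>
            have hul := tff_length ts u hp
            simp [pyStepA, hidx, pyTakeFirstFree, hp, gStep, rem, hp ▸ hL0, hlen', hul]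
      · -- b ≤ x : head passes through on both sides
        have hbx : b ≤ x := not_lt.mp hxb
        have hidx : PySem.List.bisectRight (b :: Bs) x = PySem.List.bisectRight Bs x + 1 :=
          br_cons b Bs x hs hbx
        have key : pyStepA (b :: Bs) (sc, t :: ts) x
            = ((pyStepA Bs (sc, ts) x).1, t :: (pyStepA Bs (sc, ts) x).2) := by
          simp only [pyStepA, hidx]
          by_cases hg : PySem.List.bisectRight Bs x < Bs.length
          · simp only [List.length_cons, if_pos (by omega : PySem.List.bisectRight Bs x + 1 < Bs.length + 1), if_pos hg]
            cases hp : pyTakeFirstFree ((t :: ts).drop (PySem.List.bisectRight Bs x + 1)) with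
            | none => simp [List.drop_succ_cons] at hp ⊢; simp [hp]
            | some u =>
              simp [List.drop_succ_cons] at hp ⊢
              simp [hp]
          · simp [if_neg hg]
        obtain ⟨ih1, ih2⟩ := ih ts sc hs' hlen'
        cases t with
        | true =>
          rw [key]
          constructor
          · simpa [rem] using ih1
          · simpa using ih2
        | false =>
          rw [key]
          refine ⟨?_, by simpa using ih2⟩
          have hrem : rem (b :: Bs) (false :: ts) = b :: rem Bs ts := by simp [rem]
          have hrem2 : rem (b :: Bs) (false :: (pyStepA Bs (sc, ts) x).2)
              = b :: rem Bs (pyStepA Bs (sc, ts) x).2 := by simp [rem]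
          rw [hrem, hrem2]
          cases hr : rfg x (rem Bs ts) with
          | none =>
            have : gStep (sc, rem Bs ts) x = (sc, rem Bs ts) := by simp [gStep, hr]
            rw [this] at ih1
            simp [gStep, rfg, hxb, hr]
            exact ⟨congrArg Prod.fst ih1, congrArg Prod.snd ih1⟩
          | some r =>
            have : gStep (sc, rem Bs ts) x = (sc + 1, r) := by simp [gStep, hr]
            rw [this] at ih1
            simp [gStep, rfg, hxb, hr]
            exact ⟨congrArg Prod.fst ih1, congrArg Prod.snd ih1⟩

-- folding A's step ≙ folding the abstract greedy step
lemma fold_sim (Bs : List Int) (hs : List.Pairwise (· ≤ ·) Bs) :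
    ∀ (A : List Int) (sc : Int) (ts : List Bool), ts.length = Bs.length →
    (A.foldl (pyStepA Bs) (sc, ts)).1 = (A.foldl gStep (sc, rem Bs ts)).1 := by
  intro A
  induction A with
  | nil => intro sc ts _; rfl
  | cons x A ih =>
    intro sc ts hlen
    obtain ⟨h1, h2⟩ := stepA_sim Bs ts sc x hs hlen
    have : pyStepA Bs (sc, ts) x = ((pyStepA Bs (sc, ts) x).1, (pyStepA Bs (sc, ts) x).2) := rfl
    calc (List.foldl (pyStepA Bs) (pyStepA Bs (sc, ts) x) A).1
        = (List.foldl gStep ((pyStepA Bs (sc, ts) x).1, rem Bs (pyStepA Bs (sc, ts) x).2) A).1 := by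
          rw [this]; exact ih _ _ h2
      _ = (List.foldl gStep (gStep (sc, rem Bs ts) x) A).1 := by rw [h1]

lemma rfg_sublist (x : Int) (r r' : List Int) (h : rfg x r = some r') : r'.Sublist r := by
  induction r generalizing r' with
  | nil => simp [rfg] at h
  | cons b r ih =>
    by_cases hxb : x < b
    · simp [rfg, hxb] at h; subst h; exact List.sublist_cons_self b r
    · simp [rfg, hxb, Option.map_eq_some_iff] at h
      obtain ⟨u, hu, rfl⟩ := h
      exact (ih u hu).cons₂ b

lemma gStep_pairwise (st : Int × List Int) (x : Int) (hs : List.Pairwise (· ≤ ·) st.2) :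
    List.Pairwise (· ≤ ·) (gStep st x).2 := by
  unfold gStep
  cases hr : rfg x st.2 with
  | none => exact hs
  | some r => exact hs.sublist (rfg_sublist x st.2 r hr)


-- the diamond: two greedy steps on a sorted pool commute
lemma gStep_comm (x y : Int) : ∀ (r : List Int) (sc : Int), List.Pairwise (· ≤ ·) r →
    gStep (gStep (sc, r) x) y = gStep (gStep (sc, r) y) x := by
  intro r
  induction r with
  | nil => intro sc _; simp [gStep, rfg]
  | cons b r ih =>
    intro sc hs
    have hs' : List.Pairwise (· ≤ ·) r := (List.pairwise_cons.mp hs).2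
    have hhead : ∀ c ∈ r, b ≤ c := (List.pairwise_cons.mp hs).1
    by_cases hx : x < b <;> by_cases hy : y < b
    · -- both beat b: first step removes the head either way
      cases r with
      | nil => simp [gStep, rfg, hx, hy]
      | cons c t =>
        have hc : b ≤ c := hhead c (by simp)
        simp [gStep, rfg, hx, hy, lt_of_lt_of_le hx hc, lt_of_lt_of_le hy hc]
    · -- x beats b, y does not
      simp only [gStep, rfg, if_pos hx, if_neg hy]
      cases hr : rfg y r with
      | none => simp [rfg, hx]
      | some r' => simp [rfg, hx]
    · -- y beats b, x does not
      simp only [gStep, rfg, if_pos hy, if_neg hx]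
      cases hr : rfg x r with
      | none => simp [rfg, hy]
      | some r' => simp [rfg, hy]
    · -- neither beats b: b passes through, use the IH
      have cons_step : ∀ (z sc' : Int) (r' : List Int), ¬ (z < b) →
          gStep (sc', b :: r') z = ((gStep (sc', r') z).1, b :: (gStep (sc', r') z).2) := by
        intro z sc' r' hz
        simp only [gStep, rfg, if_neg hz]
        cases hr : rfg z r' with
        | none => simp
        | some r'' => simp
      rw [cons_step x sc r hx, cons_step y sc r hy, cons_step y _ _ hy, cons_step x _ _ hx]
      simp only [Prod.mk.eta]
      rw [ih sc hs']

-- the greedy fold is invariant under permuting the query list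
lemma foldl_gStep_perm {A A' : List Int} (hp : A.Perm A') :
    ∀ (st : Int × List Int), List.Pairwise (· ≤ ·) st.2 →
    A.foldl gStep st = A'.foldl gStep st := by
  induction hp with
  | nil => intro st _; rfl
  | cons x _ ih =>
    intro st hs
    simp only [List.foldl_cons]
    exact ih _ (gStep_pairwise st x hs)
  | swap x y l =>
    intro st hs
    simp only [List.foldl_cons]
    rw [show gStep (gStep st y) x = gStep (gStep st x) y from
      (gStep_comm y x st.2 st.1 hs)]
  | trans _ _ ih1 ih2 =>
    intro st hs
    rw [ih1 st hs, ih2 st hs]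

lemma foldl_gStep_eq_gRec : ∀ (as bs : List Int) (sc : Int),
    (as.foldl gStep (sc, bs)).1 = sc + gRec as bs := by
  intro as
  induction as with
  | nil => intro bs sc; simp [gRec]
  | cons a as ih =>
    intro bs sc
    cases hr : rfg a bs with
    | none => simp [gStep, gRec, hr, ih]
    | some r =>
      simp only [List.foldl_cons, gStep, gRec, hr]
      rw [ih]
      ring

-- an element no query beats is never removed
lemma gRec_drop_small (b : Int) : ∀ (as r : List Int), (∀ a ∈ as, ¬ (a < b)) →
    gRec as (b :: r) = gRec as r := by
  intro as
  induction as with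
  | nil => intro r _; rfl
  | cons a as ih =>
    intro r h
    have ha : ¬ (a < b) := h a (by simp)
    have h' : ∀ a' ∈ as, ¬ (a' < b) := fun a' ha' => h a' (by simp [ha'])
    cases hr : rfg a r with
    | none => simp [gRec, rfg, ha, hr, ih _ h']
    | some r' => simp [gRec, rfg, ha, hr, ih _ h']

-- greedy on sorted queries = two-pointer sweep
lemma gRec_eq_tpGo : ∀ (bs as : List Int), List.Pairwise (· ≤ ·) as →
    List.Pairwise (· ≤ ·) bs → gRec as bs = tpGo as bs := by
  intro bs
  induction bs with
  | nil =>
    intro as h _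
    clear h
    induction as with
    | nil => simp [gRec, tpGo]
    | cons a as ih => simp [gRec, rfg, tpGo, ih]
  | cons b bs ih =>
    intro as hsa hsb
    have hsb' : List.Pairwise (· ≤ ·) bs := (List.pairwise_cons.mp hsb).2
    cases as with
    | nil => simp [gRec, tpGo]
    | cons a as' =>
      have hsa' : List.Pairwise (· ≤ ·) as' := (List.pairwise_cons.mp hsa).2
      by_cases hab : a < b
      · simp [gRec, rfg, hab, tpGo, ih as' hsa' hsb']
      · have hall : ∀ c ∈ a :: as', ¬ (c < b) := by
          intro c hc
          rcases List.mem_cons.mp hc with rfl | hc'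
          · exact hab
          · have := (List.pairwise_cons.mp hsa).1 c hc'
            omega
        rw [gRec_drop_small b (a :: as') bs hall]
        rw [ih (a :: as') hsa hsb']
        simp [tpGo, hab]

-- ===== VERDICT (by name: the statement is the Claim_ definition above) =====
theorem solution_spec : Claim_equal_solution := by
  intro A B _
  unfold Spec_solution solution solution_alt
  have hsB : List.Pairwise (· ≤ ·) (PySem.List.sorted B (fun b => b)) := by
    simpa using PySem.List.sorted_pairwise B (fun b => b)
  have hsA : List.Pairwise (· ≤ ·) (PySem.List.sorted A (fun a => a)) := by
    simpa using PySem.List.sorted_pairwise A (fun a => a)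
  set Bs := PySem.List.sorted B (fun b => b) with hBs
  rw [fold_sim Bs hsB A 0 (List.replicate Bs.length false) (by simp)]
  rw [rem_replicate]
  rw [foldl_gStep_perm (PySem.List.sorted_perm A (fun a => a) false).symm (0, Bs) hsB]
  rw [foldl_gStep_eq_gRec]
  rw [gRec_eq_tpGo Bs (PySem.List.sorted A (fun a => a)) hsA hsB]
  ring
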